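-- pv_equiv track=rewrite | github.com/jeanericgagnon/health-board | scripts/analyze_kpis.py | summarize_recommendations
-- ===== SOURCE A (Python) =====
-- def summarize_recommendations(recos):
--     scale = [r for r in recos if (r.get('tag') or '').lower() == 'scale']
--     cut = [r for r in recos if (r.get('tag') or '').lower() == 'cut']
--     retest = [r for r in recos if (r.get('tag') or '').lower() == 'retest']
--     hold = [r for r in recos if (r.get('tag') or '').lower() == 'hold']
--     return {
--         'scale': scale[:3],
--         'cut': cut[:3],
--         'retest': retest[:3],
--         'hold': hold[:3],
--     }
-- ===== SOURCE B (Python) =====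
-- def summarize_recommendations(recos):
--     scale, cut, retest, hold = [], [], [], []
--     for r in recos:
--         tag = (r.get('tag') or '').lower()
--         if tag == 'scale':
--             if len(scale) < 3:
--                 scale.append(r)
--         elif tag == 'cut':
--             if len(cut) < 3:
--                 cut.append(r)
--         elif tag == 'retest':
--             if len(retest) < 3:
--                 retest.append(r)
--         elif tag == 'hold':
--             if len(hold) < 3:
--                 hold.append(r)
--     return {'scale': scale, 'cut': cut, 'retest': retest, 'hold': hold}
-- ===== Notes on version B (the rewrite author's own statement) =====
-- stated objective: alternative
-- what changed: Replaces four separate filtering passes plus [:3] slices with a single dispatching pass that maintains four buckets capped at 3 elements each.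
import Mathlib
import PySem

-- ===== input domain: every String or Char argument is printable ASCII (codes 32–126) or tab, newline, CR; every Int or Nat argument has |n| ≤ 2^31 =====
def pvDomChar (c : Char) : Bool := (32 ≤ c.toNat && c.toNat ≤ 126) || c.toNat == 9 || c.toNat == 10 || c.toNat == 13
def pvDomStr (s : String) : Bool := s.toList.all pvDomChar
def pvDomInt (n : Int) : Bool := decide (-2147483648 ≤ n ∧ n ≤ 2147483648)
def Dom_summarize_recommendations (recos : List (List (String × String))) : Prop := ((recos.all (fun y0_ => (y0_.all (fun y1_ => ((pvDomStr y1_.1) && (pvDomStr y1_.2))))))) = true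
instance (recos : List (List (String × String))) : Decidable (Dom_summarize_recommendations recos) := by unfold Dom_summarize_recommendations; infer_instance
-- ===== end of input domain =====

-- B replaces A's four filtering passes with one dispatching pass over capped buckets (alternative decomposition; return value only).

-- ===== PORT A =====
-- (r.get('tag') or '').lower(): a missing 'tag' key and an empty value both give '', so getD with default '' is exact
def tagOf (r : List (String × String)) : String :=
  PySem.Str.lower (PySem.Dict.getD (PySem.Dict.mk r) "tag" "")

def summarize_recommendations (recos : List (List (String × String))) : List (String × List (List (String × String))) :=
  let scale := recos.filter (fun r => tagOf r == "scale")
  let cut := recos.filter (fun r => tagOf r == "cut")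
  let retest := recos.filter (fun r => tagOf r == "retest")
  let hold := recos.filter (fun r => tagOf r == "hold")
  [("scale", PySem.List.slice scale none (some 3)),
   ("cut", PySem.List.slice cut none (some 3)),
   ("retest", PySem.List.slice retest none (some 3)),
   ("hold", PySem.List.slice hold none (some 3))]

-- ===== PORT B =====
def altStep (st : List (List (String × String)) × List (List (String × String)) × List (List (String × String)) × List (List (String × String)))
    (r : List (String × String)) :
    List (List (String × String)) × List (List (String × String)) × List (List (String × String)) × List (List (String × String)) :=
  let t := tagOf r
  let (s, c, rt, h) := st
  if t == "scale" then (if s.length < 3 then (s ++ [r], c, rt, h) else (s, c, rt, h))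
  else if t == "cut" then (if c.length < 3 then (s, c ++ [r], rt, h) else (s, c, rt, h))
  else if t == "retest" then (if rt.length < 3 then (s, c, rt ++ [r], h) else (s, c, rt, h))
  else if t == "hold" then (if h.length < 3 then (s, c, rt, h ++ [r]) else (s, c, rt, h))
  else (s, c, rt, h)

def summarize_recommendations_alt (recos : List (List (String × String))) : List (String × List (List (String × String))) :=
  let (s, c, rt, h) := recos.foldl altStep ([], [], [], [])
  [("scale", s), ("cut", c), ("retest", rt), ("hold", h)]

-- ===== PRECONDITION & SPEC =====
def Spec_summarize_recommendations (recos : List (List (String × String))) (out : List (String × List (List (String × String)))) : Prop := out = summarize_recommendations_alt recos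
instance (recos : List (List (String × String))) (out : List (String × List (List (String × String)))) : Decidable (Spec_summarize_recommendations recos out) := by unfold Spec_summarize_recommendations; infer_instance

-- ===== CLAIM (what is proved, stated in full; the proofs are below) =====
def Claim_equal_summarize_recommendations : Prop := ∀ (recos : List (List (String × String))), Dom_summarize_recommendations recos → Spec_summarize_recommendations recos (summarize_recommendations recos)

-- ===== LEMMAS AND PROOFS =====
theorem altStep_invariant (xs : List (List (String × String)))
    (s c rt h : List (List (String × String))) :
    xs.foldl altStep (s, c, rt, h) =
      (s ++ (xs.filter (fun r => tagOf r == "scale")).take (3 - s.length),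
       c ++ (xs.filter (fun r => tagOf r == "cut")).take (3 - c.length),
       rt ++ (xs.filter (fun r => tagOf r == "retest")).take (3 - rt.length),
       h ++ (xs.filter (fun r => tagOf r == "hold")).take (3 - h.length)) := by
  induction xs generalizing s c rt h with
  | nil => simp
  | cons x xs ih =>
    simp only [List.foldl_cons, altStep, List.filter_cons]
    by_cases hs : tagOf x = "scale"
    · rw [if_pos (by simp [hs])]
      by_cases hl : s.length < 3
      · rw [if_pos hl, ih]
        have h3 : 3 - s.length = (3 - (s ++ [x]).length) + 1 := by simp; omega
        simp [hs, h3, List.take_succ_cons]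
      · rw [if_neg hl, ih]
        have h3 : 3 - s.length = 0 := by omega
        simp [hs, h3]
    · rw [if_neg (by simp [hs])]
      by_cases hc : tagOf x = "cut"
      · rw [if_pos (by simp [hc])]
        by_cases hl : c.length < 3
        · rw [if_pos hl, ih]
          have h3 : 3 - c.length = (3 - (c ++ [x]).length) + 1 := by simp; omega
          simp [hc, h3, List.take_succ_cons]
        · rw [if_neg hl, ih]
          have h3 : 3 - c.length = 0 := by omega
          simp [hc, h3]
      · rw [if_neg (by simp [hc])]
        by_cases hrt : tagOf x = "retest"
        · rw [if_pos (by simp [hrt])]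
          by_cases hl : rt.length < 3
          · rw [if_pos hl, ih]
            have h3 : 3 - rt.length = (3 - (rt ++ [x]).length) + 1 := by simp; omega
            simp [hrt, h3, List.take_succ_cons]
          · rw [if_neg hl, ih]
            have h3 : 3 - rt.length = 0 := by omega
            simp [hrt, h3]
        · rw [if_neg (by simp [hrt])]
          by_cases hh : tagOf x = "hold"
          · rw [if_pos (by simp [hh])]
            by_cases hl : h.length < 3
            · rw [if_pos hl, ih]
              have h3 : 3 - h.length = (3 - (h ++ [x]).length) + 1 := by simp; omega
              simp [hh, h3, List.take_succ_cons]
            · rw [if_neg hl, ih]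
              have h3 : 3 - h.length = 0 := by omega
              simp [hh, h3]
          · rw [if_neg (by simp [hh]), ih]
            simp [hs, hc, hrt, hh]

-- ===== VERDICT (by name: the statement is the Claim_ definition above) =====
theorem summarize_recommendations_spec : Claim_equal_summarize_recommendations := by
  intro recos _
  unfold Spec_summarize_recommendations summarize_recommendations summarize_recommendations_alt
  rw [altStep_invariant]
  simp [PySem.List.slice_to]
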